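-- pv_equiv track=rewrite | github.com/zohaibkhan745/Automatic-Extraction-of-FR-and-NFR-from-User-Stories-in-Agile-Development | requirement_classifier.py | has_quality_attributes
-- ===== SOURCE A (Python) =====
-- def has_quality_attributes(text):
--     """
--     Check if text contains quality attributes (NFR indicators)
--
--     Args:
--         text (str): Text to analyze
--
--     Returns:
--         bool: True if quality attributes found
--     """
--     quality_words = [
--         'secure', 'security', 'reliable', 'available', 'scalable',
--         'maintainable', 'usable', 'portable', 'efficient', 'stable',
--         'robust', 'user-friendly', 'intuitive', 'compatible'
--     ]
--
--     text_lower = text.lower()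
--     for word in quality_words:
--         if word in text_lower:
--             return True
--
--     return False
-- ===== SOURCE B (Python) =====
-- QUALITY_WORDS = [
--     'secure', 'security', 'reliable', 'available', 'scalable',
--     'maintainable', 'usable', 'portable', 'efficient', 'stable',
--     'robust', 'user-friendly', 'intuitive', 'compatible'
-- ]
--
--
-- def has_quality_attributes(text):
--     """Position-major scan: walk the text once and at each position test
--     whether any quality keyword starts there."""
--     low = text.lower()
--     return any(low.startswith(w, i)
--                for i in range(len(low))
--                for w in QUALITY_WORDS)
-- ===== Notes on version B (the rewrite author's own statement) =====
-- stated objective: alternative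
-- what changed: Replaces A's word-major loop (one separate substring scan of the whole text per keyword, early-returning) by a single position-major scan that walks the text once and at each position tests whether any keyword starts there.
import Mathlib
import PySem

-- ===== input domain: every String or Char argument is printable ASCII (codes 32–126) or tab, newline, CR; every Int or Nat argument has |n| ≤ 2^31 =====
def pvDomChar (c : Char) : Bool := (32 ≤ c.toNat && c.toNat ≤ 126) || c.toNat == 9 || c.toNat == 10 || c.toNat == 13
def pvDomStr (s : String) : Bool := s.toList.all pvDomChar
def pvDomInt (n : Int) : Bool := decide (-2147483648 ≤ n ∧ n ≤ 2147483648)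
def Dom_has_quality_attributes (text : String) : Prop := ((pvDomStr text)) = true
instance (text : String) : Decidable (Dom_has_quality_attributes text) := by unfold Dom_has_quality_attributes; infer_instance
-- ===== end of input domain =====

-- B replaces A's word-major loop (a separate substring scan per keyword) by a single
-- position-major scan of the text, testing at each position whether any keyword starts there
-- (objective: alternative traversal, same result).

-- the keyword list both versions share
def pvQualityWords : List String :=
  ["secure", "security", "reliable", "available", "scalable",
   "maintainable", "usable", "portable", "efficient", "stable",
   "robust", "user-friendly", "intuitive", "compatible"]

-- ===== PORT A =====
def has_quality_attributes (text : String) : Bool :=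
  let text_lower := PySem.Str.lower text
  -- 'for word in quality_words: if word in text_lower: return True' / 'return False'
  pvQualityWords.any (fun word => PySem.Str.isIn word text_lower)

-- ===== PORT B =====
def has_quality_attributes_alt (text : String) : Bool :=
  let low := PySem.Str.lower text
  -- any(low.startswith(w, i) for i in range(len(low)) for w in QUALITY_WORDS)
  -- low.startswith(w, i) with 0 ≤ i ≤ len(low) is ported by hand (exact there) as
  -- a prefix test on the suffix starting at i
  (List.range low.toList.length).any (fun i =>
    pvQualityWords.any (fun w => PySem.Chars.startswith (low.toList.drop i) w.toList))

-- ===== PRECONDITION & SPEC =====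
def Spec_has_quality_attributes (text : String) (out : Bool) : Prop := out = has_quality_attributes_alt text
instance (text : String) (out : Bool) : Decidable (Spec_has_quality_attributes text out) := by unfold Spec_has_quality_attributes; infer_instance

-- ===== CLAIM (what is proved, stated in full; the proofs are below) =====
def Claim_equal_has_quality_attributes : Prop := ∀ (text : String), Dom_has_quality_attributes text → Spec_has_quality_attributes text (has_quality_attributes text)

-- ===== LEMMAS AND PROOFS =====

lemma pvQualityWords_nonempty : ∀ w ∈ pvQualityWords, w.toList ≠ [] := by decide

-- word-major containment equals position-major prefix scan, for any word list of nonempty words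
lemma pvScan_eq (s : List Char) (ws : List String) (hne : ∀ w ∈ ws, w.toList ≠ []) :
    ws.any (fun w => PySem.Chars.isIn w.toList s)
      = (List.range s.length).any (fun i =>
          ws.any (fun w => PySem.Chars.startswith (s.drop i) w.toList)) := by
  rw [Bool.eq_iff_iff]
  simp only [List.any_eq_true, List.mem_range]
  constructor
  · rintro ⟨w, hw, hin⟩
    obtain ⟨j, hj⟩ := (PySem.Chars.exists_prefix_drop_iff_isIn w.toList s).mpr hin
    have hjlt : j < s.length := by
      by_contra h
      rw [List.drop_eq_nil_of_le (by omega)] at hj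
      exact hne w hw (List.prefix_nil.mp hj)
    exact ⟨j, hjlt, w, hw, (PySem.Chars.startswith_iff _ _).mpr hj⟩
  · rintro ⟨i, _, w, hw, hst⟩
    exact ⟨w, hw, (PySem.Chars.exists_prefix_drop_iff_isIn w.toList s).mp
      ⟨i, (PySem.Chars.startswith_iff _ _).mp hst⟩⟩

-- ===== VERDICT (by name: the statement is the Claim_ definition above) =====
theorem has_quality_attributes_spec : Claim_equal_has_quality_attributes := by
  intro text _
  unfold Spec_has_quality_attributes has_quality_attributes has_quality_attributes_alt
  simp only [PySem.Str.isIn_eq]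
  exact pvScan_eq (PySem.Str.lower text).toList pvQualityWords pvQualityWords_nonempty
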